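-- pv_equiv track=rewrite | github.com/qe-team/marmot | marmot/experiment/context_utils.py | negative_window
-- ===== SOURCE A (Python) =====
-- def negative_window(my_list, start, end):
--     res = []
--     while start < 0:
--         res.append('_START_')
--         start += 1
--     while start < min(end, len(my_list)):
--         res.append(my_list[start])
--         start += 1
--     while end > len(my_list):
--         res.append('_END_')
--         end -= 1
--     return res
-- ===== SOURCE B (Python) =====
-- def negative_window(my_list, start, end):
--     n = len(my_list)
--     lo = max(start, 0)
--     hi = min(max(end, 0), n)
--     return ['_START_'] * max(0, -start) + my_list[lo:hi] + ['_END_'] * max(0, end - n)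
-- ===== Notes on version B (the rewrite author's own statement) =====
-- stated objective: simpler
-- what changed: Replaces the three per-element append while-loops with count arithmetic: two replicated sentinel blocks and one clamped slice, concatenated.
import Mathlib
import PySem

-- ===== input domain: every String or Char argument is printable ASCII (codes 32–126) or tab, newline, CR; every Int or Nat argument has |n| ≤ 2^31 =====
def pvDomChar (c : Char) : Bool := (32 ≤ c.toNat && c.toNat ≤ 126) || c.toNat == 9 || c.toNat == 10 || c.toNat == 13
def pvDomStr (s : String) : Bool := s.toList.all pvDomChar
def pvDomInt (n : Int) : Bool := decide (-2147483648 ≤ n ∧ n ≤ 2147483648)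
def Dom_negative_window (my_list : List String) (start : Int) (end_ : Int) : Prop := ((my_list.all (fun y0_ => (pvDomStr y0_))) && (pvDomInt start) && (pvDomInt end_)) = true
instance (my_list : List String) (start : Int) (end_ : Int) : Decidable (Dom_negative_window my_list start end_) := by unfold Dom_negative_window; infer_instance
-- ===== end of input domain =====

-- B builds the result as ['_START_']*max(0,-start) + clamped slice + ['_END_']*max(0,end-len):
-- count arithmetic and one slice instead of A's three per-element append loops (objective: simpler).

-- ===== PORT A =====
-- while start < 0: res.append('_START_'); start += 1
def nwLoopStart (res : List String) (start : Int) : List String × Int :=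
  if start < 0 then nwLoopStart (res ++ ["_START_"]) (start + 1) else (res, start)
termination_by (-start).toNat
decreasing_by omega

-- while start < min(end, len): res.append(my_list[start]); start += 1
-- my_list[start] is always in range here (0 ≤ start < bound ≤ len), so getD's default is never used.
def nwLoopMid (my_list : List String) (res : List String) (start bound : Int) : List String :=
  if start < bound then
    nwLoopMid my_list (res ++ [(PySem.List.pyGet? my_list start).getD ""]) (start + 1) bound
  else res
termination_by (bound - start).toNat
decreasing_by omega

-- while end > len: res.append('_END_'); end -= 1
def nwLoopEnd (len : Int) (res : List String) (end_ : Int) : List String :=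
  if end_ > len then nwLoopEnd len (res ++ ["_END_"]) (end_ - 1) else res
termination_by (end_ - len).toNat
decreasing_by omega

def negative_window (my_list : List String) (start : Int) (end_ : Int) : List String :=
  let p := nwLoopStart [] start
  let res2 := nwLoopMid my_list p.1 p.2 (min end_ (my_list.length : Int))
  nwLoopEnd (my_list.length : Int) res2 end_

-- ===== PORT B =====
def negative_window_alt (my_list : List String) (start : Int) (end_ : Int) : List String :=
  let n : Int := my_list.length
  let lo : Int := max start 0
  let hi : Int := min (max end_ 0) n
  List.replicate (max 0 (-start)).toNat "_START_"
    ++ PySem.List.slice my_list (some lo) (some hi)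
    ++ List.replicate (max 0 (end_ - n)).toNat "_END_"

-- ===== PRECONDITION & SPEC =====
def Spec_negative_window (my_list : List String) (start : Int) (end_ : Int) (out : List String) : Prop := out = negative_window_alt my_list start end_
instance (my_list : List String) (start : Int) (end_ : Int) (out : List String) : Decidable (Spec_negative_window my_list start end_ out) := by unfold Spec_negative_window; infer_instance

-- ===== CLAIM (what is proved, stated in full; the proofs are below) =====
def Claim_equal_negative_window : Prop := ∀ (my_list : List String) (start : Int) (end_ : Int), Dom_negative_window my_list start end_ → Spec_negative_window my_list start end_ (negative_window my_list start end_)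

-- ===== LEMMAS AND PROOFS =====

theorem nwLoopStart_eq (res : List String) (start : Int) :
    nwLoopStart res start = (res ++ List.replicate (max 0 (-start)).toNat "_START_", max start 0) := by
  fun_induction nwLoopStart res start with
  | case1 res start h ih =>
    rw [ih]
    have h1 : (max 0 (-start)).toNat = (max 0 (-(start+1))).toNat + 1 := by omega
    have h2 : max (start + 1) 0 = max start 0 := by omega
    simp [h1, h2, List.replicate_succ, List.append_assoc]
  | case2 res start h =>
    have h1 : (max 0 (-start)).toNat = 0 := by omega
    have h2 : max start 0 = start := by omega
    simp [h1, h2]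

theorem nwLoopMid_eq (my_list : List String) (res : List String) (start bound : Int) :
    0 ≤ start → bound ≤ (my_list.length : Int) →
    nwLoopMid my_list res start bound
      = res ++ (my_list.take bound.toNat).drop start.toNat := by
  fun_induction nwLoopMid my_list res start bound with
  | case1 res s h ih =>
    intro hs hb
    have hlt : s.toNat < my_list.length := by omega
    have hget : PySem.List.pyGet? my_list s = my_list[s.toNat]? := by
      simp only [PySem.List.pyGet?, PySem.List.pyIdx?, if_pos hs, if_pos (show s < (my_list.length : Int) by omega), Option.bind_some]
    rw [ih (by omega) hb, hget]
    have hdrop : (my_list.take bound.toNat).drop s.toNat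
        = my_list[s.toNat] :: (my_list.take bound.toNat).drop (s.toNat + 1) := by
      rw [List.drop_eq_getElem_cons (by simp [List.length_take]; omega)]
      congr 1
      exact (List.getElem_take)
    have hst : (s + 1).toNat = s.toNat + 1 := by omega
    simp [hdrop, hst, List.getElem?_eq_getElem hlt, List.append_assoc]
  | case2 res s h =>
    intro hs hb
    have h1 : (my_list.take bound.toNat).length ≤ s.toNat := by
      simp [List.length_take]; omega
    simp [List.drop_eq_nil_of_le h1]

theorem nwLoopEnd_eq (len : Int) (res : List String) (end_ : Int) :
    nwLoopEnd len res end_ = res ++ List.replicate (max 0 (end_ - len)).toNat "_END_" := by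
  fun_induction nwLoopEnd len res end_ with
  | case1 res e h ih =>
    rw [ih]
    have h1 : (max 0 (e - len)).toNat = (max 0 (e - 1 - len)).toNat + 1 := by omega
    simp [h1, List.replicate_succ, List.append_assoc]
  | case2 res e h =>
    have h1 : (max 0 (e - len)).toNat = 0 := by omega
    simp [h1]

-- ===== VERDICT (by name: the statement is the Claim_ definition above) =====
theorem negative_window_spec : Claim_equal_negative_window := by
  intro my_list start end_ _
  show negative_window my_list start end_ = negative_window_alt my_list start end_
  unfold negative_window negative_window_alt
  dsimp only
  rw [nwLoopStart_eq]
  rw [nwLoopMid_eq my_list _ (max start 0) _ (by omega) (by omega)]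
  rw [nwLoopEnd_eq]
  have hlo : (0:Int) ≤ max start 0 := by omega
  have hhi : (0:Int) ≤ min (max end_ 0) (my_list.length : Int) := by omega
  rw [PySem.List.slice_toNat my_list hlo hhi]
  have hb : (min end_ (my_list.length : Int)).toNat
      = (min (max end_ 0) (my_list.length : Int)).toNat := by omega
  rw [hb, List.drop_take]
  simp [List.append_assoc]
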